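-- pv_equiv track=rewrite | github.com/AESolodchuk/goit-algo-hw-06 | task_2.py | dfs
-- ===== SOURCE A (Python) =====
-- def dfs(graph, start, visited=None, path=None, parent=None):
--     if visited is None:
--         visited = set()
--         path = []
--     if start not in visited:
--         visited.add(start)
--         if parent is not None:
--             path.append((parent, start))
--         for next in graph[start]:
--             dfs(graph, next, visited, path, start)
--     return path
-- ===== SOURCE B (Python) =====
-- def dfs(graph, start, visited=None, path=None, parent=None):
--     if visited is None:
--         visited = set()
--         path = []
--     stack = [(parent, start)]
--     while stack:
--         par, node = stack.pop()
--         if node in visited: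
--             continue
--         visited.add(node)
--         if par is not None:
--             path.append((par, node))
--         for child in reversed(graph[node]):
--             stack.append((node, child))
--     return path
-- ===== Notes on version B (the rewrite author's own statement) =====
-- stated objective: alternative
-- what changed: Replaces A's recursive DFS by an iterative DFS with an explicit stack of (parent, node) frames: nodes are tested against visited when popped and children are pushed in reverse so the traversal and the collected edge list are identical.
-- outside the precondition, e.g. on dfs({}, 'a', {'a'}, None, None): A returns None, B returns None
import Mathlib
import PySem

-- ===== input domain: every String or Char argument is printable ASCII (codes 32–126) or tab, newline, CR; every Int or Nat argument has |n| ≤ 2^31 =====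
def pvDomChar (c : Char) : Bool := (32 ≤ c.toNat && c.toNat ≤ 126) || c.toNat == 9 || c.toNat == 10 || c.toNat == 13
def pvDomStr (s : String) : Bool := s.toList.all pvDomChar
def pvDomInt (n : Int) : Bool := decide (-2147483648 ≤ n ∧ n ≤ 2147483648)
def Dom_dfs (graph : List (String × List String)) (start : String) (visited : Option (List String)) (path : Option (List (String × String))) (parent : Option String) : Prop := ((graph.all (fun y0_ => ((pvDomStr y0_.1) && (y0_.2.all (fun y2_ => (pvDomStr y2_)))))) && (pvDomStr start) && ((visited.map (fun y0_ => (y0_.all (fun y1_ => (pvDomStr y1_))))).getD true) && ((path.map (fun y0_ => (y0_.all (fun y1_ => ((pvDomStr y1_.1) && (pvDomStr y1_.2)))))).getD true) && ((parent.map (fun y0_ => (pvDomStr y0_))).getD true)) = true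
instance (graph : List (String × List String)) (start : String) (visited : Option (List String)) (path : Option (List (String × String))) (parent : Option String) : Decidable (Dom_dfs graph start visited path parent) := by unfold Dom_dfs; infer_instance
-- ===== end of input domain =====

-- B replaces A's recursion by an iterative DFS with an explicit stack, same pre-order result.
-- A (and B) mutate the passed visited/path objects in place; the equivalence proved here is about the return value.


-- ===== PORT A =====
-- Recursive body of Python A with the mutated (visited, path) state threaded explicitly;
-- `fuel` only bounds the recursion depth (it never runs out with the fuel given in `dfs`: depth ≤ #keys + 1).
def dfsGo (graph : List (String × List String)) : Nat → String → List String → List (String × String) → Option String → List String × List (String × String)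
  | 0, _, v, p, _ => (v, p)
  | f + 1, start, v, p, parent =>
    if start ∈ v then (v, p)
    else
      let v' := PySem.Set.add v start
      let p' := match parent with
        | some q => p ++ [(q, start)]
        | none => p
      match PySem.Dict.get? (PySem.Dict.mk graph) start with
      | none => (v', p')            -- Python raises KeyError on graph[start] here (excluded by Pre_)
      | some children => children.foldl (fun s c => dfsGo graph f c s.1 s.2 (some start)) (v', p')

def dfs (graph : List (String × List String)) (start : String) (visited : Option (List String)) (path : Option (List (String × String))) (parent : Option String) : List (String × String) :=
  match visited with
  | none => (dfsGo graph (graph.length + 1) start [] [] parent).2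
  | some v => (dfsGo graph (graph.length + 1) start v (path.getD []) parent).2
      -- path = none with visited ≠ none makes Python return None or raise AttributeError (excluded by Pre_)

-- ===== PORT B =====
-- Two termination facts for the stack loop, cited by name in its decreasing_by.
theorem pvCntAddLt {l v : List String} {x : String} (hx : x ∈ l) (hv : x ∉ v) :
    (l.filter (fun k => k ∉ PySem.Set.add v x)).length < (l.filter (fun k => k ∉ v)).length := by
  rw [PySem.Set.add_of_not_mem hv]
  have hsub : List.Sublist (l.filter (fun k => k ∉ v ++ [x])) (l.filter (fun k => k ∉ v)) := by
    apply List.monotone_filter_right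
    intro a ha
    simp only [List.mem_append, List.mem_singleton, decide_eq_true_eq, not_or] at ha ⊢
    exact ha.1
  rcases hsub.length_le.lt_or_eq with h | h
  · exact h
  · exfalso
    have := hsub.eq_of_length h
    have hxmem : x ∈ l.filter (fun k => k ∉ v) := by
      simp only [List.mem_filter, decide_eq_true_eq]; exact ⟨hx, hv⟩
    rw [← this] at hxmem
    simp at hxmem

theorem pvCntAddEq {l v : List String} {x : String} (hx : x ∉ l) :
    (l.filter (fun k => k ∉ PySem.Set.add v x)).length = (l.filter (fun k => k ∉ v)).length := by
  congr 1
  apply List.filter_congr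
  intro a ha
  have hax : a ≠ x := fun h => hx (h ▸ ha)
  simp [PySem.Set.add_eq_ite]
  split
  · rfl
  · simp [hax]

-- Iterative DFS of Source B: pop a (parent, node) frame, skip visited nodes, otherwise record the edge
-- and push the children reversed so the leftmost child is popped first (head of the list = top of stack).
def dfsLoop (graph : List (String × List String)) : List (Option String × String) → List String → List (String × String) → List String × List (String × String)
  | [], v, p => (v, p)
  | (par, node) :: rest, v, p =>
    if _h : node ∈ v then dfsLoop graph rest v p
    else
      let v' := PySem.Set.add v node
      let p' := match par with
        | some q => p ++ [(q, node)]
        | none => p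
      let children := (PySem.Dict.get? (PySem.Dict.mk graph) node).getD []   -- KeyError excluded by Pre_
      dfsLoop graph (children.reverse.foldl (fun st c => (node, c) :: st) rest) v' p'
termination_by stack v _ => (((PySem.Dict.mk graph).keys.filter (fun k => k ∉ v)).length, stack.length)
decreasing_by
  · exact Prod.Lex.right _ (Nat.lt_succ_self _)
  · rcases hg : PySem.Dict.get? (PySem.Dict.mk graph) node with _ | cs
    · have hk : node ∉ (PySem.Dict.mk graph).keys :=
        (PySem.Dict.get?_eq_none_iff_not_mem_keys _ _).mp hg
      have heq : (((PySem.Dict.mk graph).keys.filter (fun k => k ∉ PySem.Set.add v node)).length)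
           = (((PySem.Dict.mk graph).keys.filter (fun k => k ∉ v)).length) := pvCntAddEq hk
      simp only [Option.getD_none, List.reverse_nil, List.foldl_nil]
      rw [heq]
      exact Prod.Lex.right _ (Nat.lt_succ_self _)
    · have hk : node ∈ (PySem.Dict.mk graph).keys := by
        by_contra hnk
        rw [(PySem.Dict.get?_eq_none_iff_not_mem_keys _ _).mpr hnk] at hg
        simp at hg
      exact Prod.Lex.left _ _ (pvCntAddLt hk _h)

def dfs_alt (graph : List (String × List String)) (start : String) (visited : Option (List String)) (path : Option (List (String × String))) (parent : Option String) : List (String × String) :=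
  match visited with
  | none => (dfsLoop graph [(parent, start)] [] []).2
  | some v => (dfsLoop graph [(parent, start)] v (path.getD [])).2

-- ===== PRECONDITION & SPEC =====
-- pvClosure computes the exact set of nodes on which Python A evaluates graph[·]:
-- start (unless already in the initial visited set) plus, repeatedly, the not-initially-visited
-- children of closure nodes that are keys.  One expansion pass:
def pvStep (graph : List (String × List String)) (vis0 : List String) (S : List String) : List String :=
  graph.foldl
    (fun acc pr =>
      if pr.1 ∈ acc then acc ++ pr.2.filter (fun c => !(c ∈ vis0) && !(c ∈ acc)) else acc) S

-- Iterated to a fixpoint: each pass adds at least one new node or changes nothing, and every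
-- added node is some listed child, so 2 + (total number of listed children) passes suffice.
def pvClosure (graph : List (String × List String)) (vis0 : List String) (start : String) : List String :=
  (List.range (2 + (graph.map (fun pr => pr.2.length)).sum)).foldl
    (fun S _ => pvStep graph vis0 S)
    (if start ∈ vis0 then [] else [start])

-- Pre_ excludes exactly the inputs on which Python A does not return a list:
-- (a) visited supplied with path = None — A then returns None (not a list) or raises
--     AttributeError on path.append; (b) some node A actually reaches (an element of
--     pvClosure) is not a key of graph — A raises KeyError there.  Unreached dangling
-- neighbours stay inside Pre_ and the equivalence is proved for them.
def Pre_dfs (graph : List (String × List String)) (start : String) (visited : Option (List String)) (path : Option (List (String × String))) (parent : Option String) : Prop :=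
  (visited = none ∨ path ≠ none) ∧
  (∀ n ∈ pvClosure graph (visited.getD []) start, n ∈ (PySem.Dict.mk graph).keys)
instance (graph : List (String × List String)) (start : String) (visited : Option (List String)) (path : Option (List (String × String))) (parent : Option String) : Decidable (Pre_dfs graph start visited path parent) := by unfold Pre_dfs; infer_instance

def pvWitness_dfs : (List (String × List String)) × String × Option (List String) × (Option (List (String × String))) × Option String :=
  ([("a", ["b", "c"]), ("b", ["a"]), ("c", [])], "a", none, none, none)

def Spec_dfs (graph : List (String × List String)) (start : String) (visited : Option (List String)) (path : Option (List (String × String))) (parent : Option String) (out : List (String × String)) : Prop := out = dfs_alt graph start visited path parent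
instance (graph : List (String × List String)) (start : String) (visited : Option (List String)) (path : Option (List (String × String))) (parent : Option String) (out : List (String × String)) : Decidable (Spec_dfs graph start visited path parent out) := by unfold Spec_dfs; infer_instance

-- ===== CLAIM (what is proved, stated in full; the proofs are below) =====
def Claim_equal_dfs : Prop := ∀ (graph : List (String × List String)) (start : String) (visited : Option (List String)) (path : Option (List (String × String))) (parent : Option String), Dom_dfs graph start visited path parent → Pre_dfs graph start visited path parent → Spec_dfs graph start visited path parent (dfs graph start visited path parent)

-- ===== LEMMAS AND PROOFS =====
theorem pvCntMono {l v w : List String} (hvw : v ⊆ w) :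
    (l.filter (fun k => k ∉ w)).length ≤ (l.filter (fun k => k ∉ v)).length := by
  apply List.Sublist.length_le
  apply List.monotone_filter_right
  intro a ha
  simp only [decide_eq_true_eq] at ha ⊢
  exact fun hm => ha (hvw hm)

-- A's recursion only ever adds to visited.
theorem dfsGo_subset (graph : List (String × List String)) :
    ∀ (f : Nat) (start : String) (v : List String) (p : List (String × String)) (par : Option String),
      v ⊆ (dfsGo graph f start v p par).1 := by
  intro f
  induction f with
  | zero => intro start v p par; simp [dfsGo]
  | succ f ih =>
    have hfold : ∀ (start : String) (cs : List String) (s : List String × List (String × String)),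
        s.1 ⊆ (cs.foldl (fun s c => dfsGo graph f c s.1 s.2 (some start)) s).1 := by
      intro start cs
      induction cs with
      | nil => intro s; simp
      | cons c cs ihc =>
        intro s
        simp only [List.foldl_cons]
        exact (ih c s.1 s.2 (some start)).trans (ihc _)
    intro start v p par
    have hv' : v ⊆ PySem.Set.add v start := fun x hx => (PySem.Set.mem_add _ _ _).mpr (Or.inl hx)
    simp only [dfsGo]
    split
    · exact fun x hx => hx
    · cases hg : PySem.Dict.get? (PySem.Dict.mk graph) start with
      | none => exact hv'
      | some cs =>
        exact hv'.trans (hfold start cs (PySem.Set.add v start,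
          match par with | some q => p ++ [(q, start)] | none => p))

-- pushing the reversed children one by one = the children frames in order, on top of the rest
theorem pvPushRev (node : String) (l : List String) (rest : List (Option String × String)) :
    l.reverse.foldl (fun st c => ((some node : Option String), c) :: st) rest
      = l.map (fun c => (some node, c)) ++ rest := by
  rw [List.foldl_reverse]
  induction l with
  | nil => simp
  | cons c cs ih => simp [ih]

theorem dfsLoop_nil (graph : List (String × List String)) (v : List String) (p : List (String × String)) :
    dfsLoop graph [] v p = (v, p) := by
  rw [dfsLoop.eq_def]

theorem dfsLoop_cons (graph : List (String × List String)) (par : Option String) (node : String)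
    (rest : List (Option String × String)) (v : List String) (p : List (String × String)) :
    dfsLoop graph ((par, node) :: rest) v p
      = if node ∈ v then dfsLoop graph rest v p
        else
          dfsLoop graph
            (((PySem.Dict.get? (PySem.Dict.mk graph) node).getD []).reverse.foldl
              (fun st c => (some node, c) :: st) rest)
            (PySem.Set.add v node)
            (match par with | some q => p ++ [(q, node)] | none => p) := by
  rw [dfsLoop.eq_def]
  split <;> split <;> simp_all

-- MAIN LEMMA: with enough fuel, processing one stack frame to completion is exactly A's recursive call.
theorem pvBridge (graph : List (String × List String)) :
    ∀ (fa : Nat) (start : String) (v : List String) (p : List (String × String)) (par : Option String)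
      (rest : List (Option String × String)),
      ((PySem.Dict.mk graph).keys.filter (fun k => k ∉ v)).length + 1 ≤ fa →
      dfsLoop graph ((par, start) :: rest) v p
        = dfsLoop graph rest (dfsGo graph fa start v p par).1 (dfsGo graph fa start v p par).2 := by
  intro fa
  induction fa with
  | zero => intro start v p par rest h; omega
  | succ f ih =>
    intro start v p par rest h
    rw [dfsLoop_cons]
    by_cases hv : start ∈ v
    · simp only [dfsGo, if_pos hv]
    · simp only [dfsGo, if_neg hv]
      cases hg : PySem.Dict.get? (PySem.Dict.mk graph) start with
      | none =>
        simp only [Option.getD_none, List.reverse_nil, List.foldl_nil]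
      | some cs =>
        have hk : start ∈ (PySem.Dict.mk graph).keys := by
          by_contra hnk
          rw [(PySem.Dict.get?_eq_none_iff_not_mem_keys _ _).mpr hnk] at hg
          simp at hg
        have hlt := pvCntAddLt hk hv (l := (PySem.Dict.mk graph).keys)
        simp only [Option.getD_some, pvPushRev]
        have inner : ∀ (cs' : List String) (v1 : List String) (p1 : List (String × String))
            (rest' : List (Option String × String)),
            ((PySem.Dict.mk graph).keys.filter (fun k => k ∉ v1)).length + 1 ≤ f →
            dfsLoop graph (cs'.map (fun c => ((some start : Option String), c)) ++ rest') v1 p1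
              = dfsLoop graph rest'
                  (cs'.foldl (fun s c => dfsGo graph f c s.1 s.2 (some start)) (v1, p1)).1
                  (cs'.foldl (fun s c => dfsGo graph f c s.1 s.2 (some start)) (v1, p1)).2 := by
          intro cs'
          induction cs' with
          | nil => intro v1 p1 rest' _; simp
          | cons c cs' ihc =>
            intro v1 p1 rest' h1
            simp only [List.map_cons, List.cons_append, List.foldl_cons]
            rw [ih c v1 p1 (some start) _ h1]
            apply ihc
            calc ((PySem.Dict.mk graph).keys.filter (fun k => k ∉ (dfsGo graph f c v1 p1 (some start)).1)).length + 1
                ≤ ((PySem.Dict.mk graph).keys.filter (fun k => k ∉ v1)).length + 1 :=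
                  Nat.add_le_add_right (pvCntMono (dfsGo_subset graph f c v1 p1 (some start))) 1
              _ ≤ f := h1
        apply inner
        omega

theorem pvCntTop (graph : List (String × List String)) (v : List String) :
    ((PySem.Dict.mk graph).keys.filter (fun k => k ∉ v)).length + 1 ≤ graph.length + 1 := by
  have h1 := List.length_filter_le (fun k => decide (k ∉ v)) (PySem.Dict.mk graph).keys
  have h2 : (PySem.Dict.mk graph).keys.length = graph.length := by
    simp [PySem.Dict.keys]
  omega

theorem pvTop (graph : List (String × List String)) (start : String) (v : List String)
    (p : List (String × String)) (parent : Option String) :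
    (dfsGo graph (graph.length + 1) start v p parent).2 = (dfsLoop graph [(parent, start)] v p).2 := by
  rw [pvBridge graph (graph.length + 1) start v p parent [] (pvCntTop graph v), dfsLoop_nil]

-- ===== VERDICT (by name: the statement is the Claim_ definition above) =====
theorem dfs_spec : Claim_equal_dfs := by
  intro graph start visited path parent _ _
  unfold Spec_dfs dfs dfs_alt
  cases visited with
  | none => exact pvTop graph start [] [] parent
  | some v => exact pvTop graph start v (path.getD []) parent
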